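-- pv_equiv track=rewrite | github.com/newbieadi2404/secure-health-vault | backend/app.py | get_auto_response
-- ===== SOURCE A (Python) =====
-- def get_auto_response(user_message):
--     """Generate auto-responses for support queries"""
--     user_message = user_message.lower()
--
--     # Common responses based on keywords
--     if any(word in user_message for word in ['encrypt', 'encryption']):
--         return (
--             "🔒 For encryption help: Go to the Encrypt page, select your data "
--             "file, and click 'Encrypt'. Use a strong key for better security. "
--             "Need more help?"
--         )
--     elif any(word in user_message for word in ['decrypt', 'decryption']):
--         return (
--             "🔓 For decryption: Visit the Decrypt page, enter your role "
--             "(doctor/nurse), and provide the correct decryption key. Contact "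
--             "admin if you need key reset."
--         )
--     elif any(word in user_message for word in ['password', 'reset', 'forgot']):
--         return (
--             "🔑 For password reset: Go to login page, click 'Forgot "
--             "Password', enter your username/email, and check your inbox "
--             "for reset link."
--         )
--     elif any(word in user_message for word in ['email', 'send', 'receive']):
--         return (
--             "📧 For secure emails: Use the Send Email feature to encrypt "
--             "messages. Recipients need their public key registered to "
--             "receive encrypted emails."
--         )
--     elif any(word in user_message for word in ['audit', 'log', 'verify']):
--         return (
--             "📋 Audit logs track all system activities. Admins can verify "
--             "integrity using the Verify Audit page. Logs cannot be "
--             "tampered with!"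
--         )
--     elif any(word in user_message for word in ['key', 'keys']):
--         return (
--             "🔑 Keys are managed by the system. If you need a new key, "
--             "contact admin. Never share your private keys with anyone."
--         )
--     elif any(word in user_message for word in ['dicom', 'medical', 'image']):
--         return (
--             "🏥 DICOM files are medical images. Use the DICOM handler to "
--             "sign and verify medical images for authenticity."
--         )
--     elif any(word in user_message for word in ['help', 'help me', 'support']):
--         return (
--             "👋 Hi! I'm the Healthcare Crypto Support Bot. I can help with: "
--             "encryption, decryption, passwords, emails, keys, and audit "
--             "logs. What do you need?"
--         )
--     elif any(word in user_message for word in ['thank', 'thanks']):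
--         return (
--             "😊 You're welcome! Let me know if you need anything else. "
--             "Stay secure!"
--         )
--     elif any(word in user_message for word in ['prescription', 'medication']):
--         return (
--             "💊 Prescriptions: You can now issue digital prescriptions via "
--             "the Prescriptions dashboard. All medication data is secured "
--             "using AES-256-GCM. Need help issuing one?"
--         )
--     elif any(word in user_message for word in ['report', 'medical report']):
--         return (
--             "📄 Medical Reports: Access unified patient reports from the "
--             "Medical Reports section. You can create, view, and share "
--             "reports securely. Any specific report you're looking for?"
--         )
--     elif any(word in user_message for word in ['appointment', 'schedule']):
--         return (
--             "📅 Appointments: Manage your consultation schedule in the "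
--             "Appointments dashboard. You can book new slots or check "
--             "existing ones. Ready to schedule?"
--         )
--     elif any(word in user_message for word in ['record', 'patient record']):
--         return (
--             "📋 Patient Records: View unified demographic and clinical data "
--             "in the Patient Records portal. Search by Patient ID for quick "
--             "access."
--         )
--     elif any(word in user_message for word in ['hi', 'hello', 'hey']):
--         return (
--             "👋 Hello! I'm your Healthcare Crypto Assistant. I can help "
--             "with clinical tools (Prescriptions, Reports, Appointments) "
--             "or security features (Encryption, Secure Email). How can I "
--             "assist you?"
--         )
--     else:
--         return (
--             "📝 I've received your clinical support request. Our team will "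
--             "review this and respond shortly. For urgent medical technical "
--             "issues, call +1 (555) 911-HELP."
--         )
-- ===== SOURCE B (Python) =====
-- # Flat inverted index: each keyword maps to the priority of its rule; one full
-- # pass keeps the minimum matched priority, which indexes the response table.
-- KEYWORDS = [
--     ("encrypt", 0), ("encryption", 0),
--     ("decrypt", 1), ("decryption", 1),
--     ("password", 2), ("reset", 2), ("forgot", 2),
--     ("email", 3), ("send", 3), ("receive", 3),
--     ("audit", 4), ("log", 4), ("verify", 4),
--     ("key", 5), ("keys", 5),
--     ("dicom", 6), ("medical", 6), ("image", 6),
--     ("help", 7), ("help me", 7), ("support", 7),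
--     ("thank", 8), ("thanks", 8),
--     ("prescription", 9), ("medication", 9),
--     ("report", 10), ("medical report", 10),
--     ("appointment", 11), ("schedule", 11),
--     ("record", 12), ("patient record", 12),
--     ("hi", 13), ("hello", 13), ("hey", 13),
-- ]
--
-- RESPONSES = [
--     "🔒 For encryption help: Go to the Encrypt page, select your data "
--     "file, and click 'Encrypt'. Use a strong key for better security. "
--     "Need more help?",
--     "🔓 For decryption: Visit the Decrypt page, enter your role "
--     "(doctor/nurse), and provide the correct decryption key. Contact "
--     "admin if you need key reset.",
--     "🔑 For password reset: Go to login page, click 'Forgot "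
--     "Password', enter your username/email, and check your inbox "
--     "for reset link.",
--     "📧 For secure emails: Use the Send Email feature to encrypt "
--     "messages. Recipients need their public key registered to "
--     "receive encrypted emails.",
--     "📋 Audit logs track all system activities. Admins can verify "
--     "integrity using the Verify Audit page. Logs cannot be "
--     "tampered with!",
--     "🔑 Keys are managed by the system. If you need a new key, "
--     "contact admin. Never share your private keys with anyone.",
--     "🏥 DICOM files are medical images. Use the DICOM handler to "
--     "sign and verify medical images for authenticity.",
--     "👋 Hi! I'm the Healthcare Crypto Support Bot. I can help with: "
--     "encryption, decryption, passwords, emails, keys, and audit "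
--     "logs. What do you need?",
--     "😊 You're welcome! Let me know if you need anything else. "
--     "Stay secure!",
--     "💊 Prescriptions: You can now issue digital prescriptions via "
--     "the Prescriptions dashboard. All medication data is secured "
--     "using AES-256-GCM. Need help issuing one?",
--     "📄 Medical Reports: Access unified patient reports from the "
--     "Medical Reports section. You can create, view, and share "
--     "reports securely. Any specific report you're looking for?",
--     "📅 Appointments: Manage your consultation schedule in the "
--     "Appointments dashboard. You can book new slots or check "
--     "existing ones. Ready to schedule?",
--     "📋 Patient Records: View unified demographic and clinical data "
--     "in the Patient Records portal. Search by Patient ID for quick "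
--     "access.",
--     "👋 Hello! I'm your Healthcare Crypto Assistant. I can help "
--     "with clinical tools (Prescriptions, Reports, Appointments) "
--     "or security features (Encryption, Secure Email). How can I "
--     "assist you?",
--     "📝 I've received your clinical support request. Our team will "
--     "review this and respond shortly. For urgent medical technical "
--     "issues, call +1 (555) 911-HELP.",
-- ]
--
--
-- def get_auto_response(user_message):
--     """Generate auto-responses for support queries"""
--     m = user_message.lower()
--     best = len(RESPONSES) - 1  # fallback response
--     for kw, pri in KEYWORDS:
--         if pri < best and kw in m:
--             best = pri
--     return RESPONSES[best]
-- ===== Notes on version B (the rewrite author's own statement) =====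
-- stated objective: alternative
-- what changed: Replaced the 14-way if/elif ladder of grouped any() checks with a flat inverted keyword-to-priority index scanned in one full pass while tracking the minimum matched priority, which then indexes a response table (no early return, no per-group any()).
import Mathlib
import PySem

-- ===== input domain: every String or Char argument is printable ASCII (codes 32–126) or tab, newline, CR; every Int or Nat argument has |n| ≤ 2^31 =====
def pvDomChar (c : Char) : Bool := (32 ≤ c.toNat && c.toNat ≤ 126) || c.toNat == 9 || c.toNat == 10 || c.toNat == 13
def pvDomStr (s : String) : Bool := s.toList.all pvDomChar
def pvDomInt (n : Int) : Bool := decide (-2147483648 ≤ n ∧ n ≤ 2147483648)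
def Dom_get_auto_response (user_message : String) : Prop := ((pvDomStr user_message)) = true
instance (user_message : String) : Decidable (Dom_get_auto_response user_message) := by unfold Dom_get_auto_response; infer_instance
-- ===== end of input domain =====

-- B replaces A's if/elif ladder of grouped checks with a flat keyword→priority index scanned in one full pass keeping the minimum matched priority (objective: alternative); same return values.
-- ===== PORT A =====
def get_auto_response (user_message : String) : String :=
  let m := PySem.Str.lower user_message
  if ["encrypt", "encryption"].any (fun w => PySem.Str.isIn w m) then
    "🔒 For encryption help: Go to the Encrypt page, select your data file, and click 'Encrypt'. Use a strong key for better security. Need more help?"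
  else if ["decrypt", "decryption"].any (fun w => PySem.Str.isIn w m) then
    "🔓 For decryption: Visit the Decrypt page, enter your role (doctor/nurse), and provide the correct decryption key. Contact admin if you need key reset."
  else if ["password", "reset", "forgot"].any (fun w => PySem.Str.isIn w m) then
    "🔑 For password reset: Go to login page, click 'Forgot Password', enter your username/email, and check your inbox for reset link."
  else if ["email", "send", "receive"].any (fun w => PySem.Str.isIn w m) then
    "📧 For secure emails: Use the Send Email feature to encrypt messages. Recipients need their public key registered to receive encrypted emails."
  else if ["audit", "log", "verify"].any (fun w => PySem.Str.isIn w m) then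
    "📋 Audit logs track all system activities. Admins can verify integrity using the Verify Audit page. Logs cannot be tampered with!"
  else if ["key", "keys"].any (fun w => PySem.Str.isIn w m) then
    "🔑 Keys are managed by the system. If you need a new key, contact admin. Never share your private keys with anyone."
  else if ["dicom", "medical", "image"].any (fun w => PySem.Str.isIn w m) then
    "🏥 DICOM files are medical images. Use the DICOM handler to sign and verify medical images for authenticity."
  else if ["help", "help me", "support"].any (fun w => PySem.Str.isIn w m) then
    "👋 Hi! I'm the Healthcare Crypto Support Bot. I can help with: encryption, decryption, passwords, emails, keys, and audit logs. What do you need?"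
  else if ["thank", "thanks"].any (fun w => PySem.Str.isIn w m) then
    "😊 You're welcome! Let me know if you need anything else. Stay secure!"
  else if ["prescription", "medication"].any (fun w => PySem.Str.isIn w m) then
    "💊 Prescriptions: You can now issue digital prescriptions via the Prescriptions dashboard. All medication data is secured using AES-256-GCM. Need help issuing one?"
  else if ["report", "medical report"].any (fun w => PySem.Str.isIn w m) then
    "📄 Medical Reports: Access unified patient reports from the Medical Reports section. You can create, view, and share reports securely. Any specific report you're looking for?"
  else if ["appointment", "schedule"].any (fun w => PySem.Str.isIn w m) then
    "📅 Appointments: Manage your consultation schedule in the Appointments dashboard. You can book new slots or check existing ones. Ready to schedule?"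
  else if ["record", "patient record"].any (fun w => PySem.Str.isIn w m) then
    "📋 Patient Records: View unified demographic and clinical data in the Patient Records portal. Search by Patient ID for quick access."
  else if ["hi", "hello", "hey"].any (fun w => PySem.Str.isIn w m) then
    "👋 Hello! I'm your Healthcare Crypto Assistant. I can help with clinical tools (Prescriptions, Reports, Appointments) or security features (Encryption, Secure Email). How can I assist you?"
  else
    "📝 I've received your clinical support request. Our team will review this and respond shortly. For urgent medical technical issues, call +1 (555) 911-HELP."

-- ===== PORT B =====
def pvKeywords : List (String × Nat) := [("encrypt", 0), ("encryption", 0), ("decrypt", 1), ("decryption", 1), ("password", 2), ("reset", 2), ("forgot", 2), ("email", 3), ("send", 3), ("receive", 3), ("audit", 4), ("log", 4), ("verify", 4), ("key", 5), ("keys", 5), ("dicom", 6), ("medical", 6), ("image", 6), ("help", 7), ("help me", 7), ("support", 7), ("thank", 8), ("thanks", 8), ("prescription", 9), ("medication", 9), ("report", 10), ("medical report", 10), ("appointment", 11), ("schedule", 11), ("record", 12), ("patient record", 12), ("hi", 13), ("hello", 13), ("hey", 13)]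

def pvResponses : List String := [
  "🔒 For encryption help: Go to the Encrypt page, select your data file, and click 'Encrypt'. Use a strong key for better security. Need more help?",
  "🔓 For decryption: Visit the Decrypt page, enter your role (doctor/nurse), and provide the correct decryption key. Contact admin if you need key reset.",
  "🔑 For password reset: Go to login page, click 'Forgot Password', enter your username/email, and check your inbox for reset link.",
  "📧 For secure emails: Use the Send Email feature to encrypt messages. Recipients need their public key registered to receive encrypted emails.",
  "📋 Audit logs track all system activities. Admins can verify integrity using the Verify Audit page. Logs cannot be tampered with!",
  "🔑 Keys are managed by the system. If you need a new key, contact admin. Never share your private keys with anyone.",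
  "🏥 DICOM files are medical images. Use the DICOM handler to sign and verify medical images for authenticity.",
  "👋 Hi! I'm the Healthcare Crypto Support Bot. I can help with: encryption, decryption, passwords, emails, keys, and audit logs. What do you need?",
  "😊 You're welcome! Let me know if you need anything else. Stay secure!",
  "💊 Prescriptions: You can now issue digital prescriptions via the Prescriptions dashboard. All medication data is secured using AES-256-GCM. Need help issuing one?",
  "📄 Medical Reports: Access unified patient reports from the Medical Reports section. You can create, view, and share reports securely. Any specific report you're looking for?",
  "📅 Appointments: Manage your consultation schedule in the Appointments dashboard. You can book new slots or check existing ones. Ready to schedule?",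
  "📋 Patient Records: View unified demographic and clinical data in the Patient Records portal. Search by Patient ID for quick access.",
  "👋 Hello! I'm your Healthcare Crypto Assistant. I can help with clinical tools (Prescriptions, Reports, Appointments) or security features (Encryption, Secure Email). How can I assist you?",
  "📝 I've received your clinical support request. Our team will review this and respond shortly. For urgent medical technical issues, call +1 (555) 911-HELP."]

-- loop body of Source B's for-loop: keep the smaller matched priority
def pvStep (m : String) (b : Nat) (kp : String × Nat) : Nat :=
  if kp.2 < b ∧ PySem.Str.isIn kp.1 m then kp.2 else b

def get_auto_response_alt (user_message : String) : String :=
  let m := PySem.Str.lower user_message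
  -- RESPONSES[best]: best is always < pvResponses.length, so getD's default is never used
  pvResponses.getD (pvKeywords.foldl (pvStep m) (pvResponses.length - 1)) ""

-- ===== PRECONDITION & SPEC =====
def Spec_get_auto_response (user_message : String) (out : String) : Prop := out = get_auto_response_alt user_message
instance (user_message : String) (out : String) : Decidable (Spec_get_auto_response user_message out) := by unfold Spec_get_auto_response; infer_instance

-- ===== CLAIM =====
def Claim_equal_get_auto_response : Prop := ∀ (user_message : String), Dom_get_auto_response user_message → Spec_get_auto_response user_message (get_auto_response user_message)

-- ===== LEMMAS AND PROOFS =====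
def pvG (kws : List String) (p : Nat) : List (String × Nat) := kws.map (fun k => (k, p))

def pvRest0 : List (String × Nat) := [("decrypt", 1), ("decryption", 1), ("password", 2), ("reset", 2), ("forgot", 2), ("email", 3), ("send", 3), ("receive", 3), ("audit", 4), ("log", 4), ("verify", 4), ("key", 5), ("keys", 5), ("dicom", 6), ("medical", 6), ("image", 6), ("help", 7), ("help me", 7), ("support", 7), ("thank", 8), ("thanks", 8), ("prescription", 9), ("medication", 9), ("report", 10), ("medical report", 10), ("appointment", 11), ("schedule", 11), ("record", 12), ("patient record", 12), ("hi", 13), ("hello", 13), ("hey", 13)]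
def pvRest1 : List (String × Nat) := [("password", 2), ("reset", 2), ("forgot", 2), ("email", 3), ("send", 3), ("receive", 3), ("audit", 4), ("log", 4), ("verify", 4), ("key", 5), ("keys", 5), ("dicom", 6), ("medical", 6), ("image", 6), ("help", 7), ("help me", 7), ("support", 7), ("thank", 8), ("thanks", 8), ("prescription", 9), ("medication", 9), ("report", 10), ("medical report", 10), ("appointment", 11), ("schedule", 11), ("record", 12), ("patient record", 12), ("hi", 13), ("hello", 13), ("hey", 13)]
def pvRest2 : List (String × Nat) := [("email", 3), ("send", 3), ("receive", 3), ("audit", 4), ("log", 4), ("verify", 4), ("key", 5), ("keys", 5), ("dicom", 6), ("medical", 6), ("image", 6), ("help", 7), ("help me", 7), ("support", 7), ("thank", 8), ("thanks", 8), ("prescription", 9), ("medication", 9), ("report", 10), ("medical report", 10), ("appointment", 11), ("schedule", 11), ("record", 12), ("patient record", 12), ("hi", 13), ("hello", 13), ("hey", 13)]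
def pvRest3 : List (String × Nat) := [("audit", 4), ("log", 4), ("verify", 4), ("key", 5), ("keys", 5), ("dicom", 6), ("medical", 6), ("image", 6), ("help", 7), ("help me", 7), ("support", 7), ("thank", 8), ("thanks", 8), ("prescription", 9), ("medication", 9), ("report", 10), ("medical report", 10), ("appointment", 11), ("schedule", 11), ("record", 12), ("patient record", 12), ("hi", 13), ("hello", 13), ("hey", 13)]
def pvRest4 : List (String × Nat) := [("key", 5), ("keys", 5), ("dicom", 6), ("medical", 6), ("image", 6), ("help", 7), ("help me", 7), ("support", 7), ("thank", 8), ("thanks", 8), ("prescription", 9), ("medication", 9), ("report", 10), ("medical report", 10), ("appointment", 11), ("schedule", 11), ("record", 12), ("patient record", 12), ("hi", 13), ("hello", 13), ("hey", 13)]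
def pvRest5 : List (String × Nat) := [("dicom", 6), ("medical", 6), ("image", 6), ("help", 7), ("help me", 7), ("support", 7), ("thank", 8), ("thanks", 8), ("prescription", 9), ("medication", 9), ("report", 10), ("medical report", 10), ("appointment", 11), ("schedule", 11), ("record", 12), ("patient record", 12), ("hi", 13), ("hello", 13), ("hey", 13)]
def pvRest6 : List (String × Nat) := [("help", 7), ("help me", 7), ("support", 7), ("thank", 8), ("thanks", 8), ("prescription", 9), ("medication", 9), ("report", 10), ("medical report", 10), ("appointment", 11), ("schedule", 11), ("record", 12), ("patient record", 12), ("hi", 13), ("hello", 13), ("hey", 13)]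
def pvRest7 : List (String × Nat) := [("thank", 8), ("thanks", 8), ("prescription", 9), ("medication", 9), ("report", 10), ("medical report", 10), ("appointment", 11), ("schedule", 11), ("record", 12), ("patient record", 12), ("hi", 13), ("hello", 13), ("hey", 13)]
def pvRest8 : List (String × Nat) := [("prescription", 9), ("medication", 9), ("report", 10), ("medical report", 10), ("appointment", 11), ("schedule", 11), ("record", 12), ("patient record", 12), ("hi", 13), ("hello", 13), ("hey", 13)]
def pvRest9 : List (String × Nat) := [("report", 10), ("medical report", 10), ("appointment", 11), ("schedule", 11), ("record", 12), ("patient record", 12), ("hi", 13), ("hello", 13), ("hey", 13)]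
def pvRest10 : List (String × Nat) := [("appointment", 11), ("schedule", 11), ("record", 12), ("patient record", 12), ("hi", 13), ("hello", 13), ("hey", 13)]
def pvRest11 : List (String × Nat) := [("record", 12), ("patient record", 12), ("hi", 13), ("hello", 13), ("hey", 13)]
def pvRest12 : List (String × Nat) := [("hi", 13), ("hello", 13), ("hey", 13)]

theorem pvfold_ge (m : String) (L : List (String × Nat)) (b : Nat)
    (h : ∀ kp ∈ L, b ≤ kp.2) : L.foldl (pvStep m) b = b := by
  induction L with
  | nil => rfl
  | cons kp t ih =>
    have hb : b ≤ kp.2 := h kp (List.mem_cons_self)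
    simp only [List.foldl_cons, pvStep]
    rw [if_neg (fun hc => absurd hc.1 (Nat.not_lt.2 hb))]
    exact ih (fun x hx => h x (List.mem_cons_of_mem _ hx))

theorem pvfold_group (m : String) (kws : List String) (p b : Nat) (hp : p < b) :
    (pvG kws p).foldl (pvStep m) b
      = if kws.any (fun w => PySem.Str.isIn w m) then p else b := by
  induction kws with
  | nil => rfl
  | cons k t ih =>
    simp only [pvG, List.map_cons, List.foldl_cons, List.any_cons]
    by_cases h : PySem.Str.isIn k m = true
    · rw [show pvStep m b (k, p) = p from by unfold pvStep; exact if_pos ⟨hp, h⟩]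
      rw [pvfold_ge m _ p (by intro kp hkp; obtain ⟨x, -, rfl⟩ := List.mem_map.1 hkp; exact Nat.le_refl _)]
      simp only [h, Bool.true_or, if_true]
    · rw [show pvStep m b (k, p) = b from by unfold pvStep; exact if_neg (fun hc => h hc.2)]
      rw [show (t.map fun k => (k, p)) = pvG t p from rfl, ih]
      simp only [Bool.eq_false_iff.mpr h, Bool.false_or]

theorem pvLen14 : pvResponses.length - 1 = 14 := rfl

-- ===== VERDICT =====
theorem get_auto_response_spec : Claim_equal_get_auto_response := by
  intro u _
  simp only [Spec_get_auto_response, get_auto_response, get_auto_response_alt, pvLen14]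
  generalize PySem.Str.lower u = m
  rw [show pvKeywords = pvG ["encrypt", "encryption"] 0 ++ pvRest0 from rfl, List.foldl_append, pvfold_group m ["encrypt", "encryption"] 0 14 (by norm_num)]
  by_cases h0 : (["encrypt", "encryption"].any (fun w => PySem.Str.isIn w m)) = true
  · simp only [if_pos h0]
    rw [pvfold_ge m pvRest0 0 (by decide)]
    rfl
  · simp only [if_neg h0]
    rw [show pvRest0 = pvG ["decrypt", "decryption"] 1 ++ pvRest1 from rfl, List.foldl_append, pvfold_group m ["decrypt", "decryption"] 1 14 (by norm_num)]
    by_cases h1 : (["decrypt", "decryption"].any (fun w => PySem.Str.isIn w m)) = true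
    · simp only [if_pos h1]
      rw [pvfold_ge m pvRest1 1 (by decide)]
      rfl
    · simp only [if_neg h1]
      rw [show pvRest1 = pvG ["password", "reset", "forgot"] 2 ++ pvRest2 from rfl, List.foldl_append, pvfold_group m ["password", "reset", "forgot"] 2 14 (by norm_num)]
      by_cases h2 : (["password", "reset", "forgot"].any (fun w => PySem.Str.isIn w m)) = true
      · simp only [if_pos h2]
        rw [pvfold_ge m pvRest2 2 (by decide)]
        rfl
      · simp only [if_neg h2]
        rw [show pvRest2 = pvG ["email", "send", "receive"] 3 ++ pvRest3 from rfl, List.foldl_append, pvfold_group m ["email", "send", "receive"] 3 14 (by norm_num)]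
        by_cases h3 : (["email", "send", "receive"].any (fun w => PySem.Str.isIn w m)) = true
        · simp only [if_pos h3]
          rw [pvfold_ge m pvRest3 3 (by decide)]
          rfl
        · simp only [if_neg h3]
          rw [show pvRest3 = pvG ["audit", "log", "verify"] 4 ++ pvRest4 from rfl, List.foldl_append, pvfold_group m ["audit", "log", "verify"] 4 14 (by norm_num)]
          by_cases h4 : (["audit", "log", "verify"].any (fun w => PySem.Str.isIn w m)) = true
          · simp only [if_pos h4]
            rw [pvfold_ge m pvRest4 4 (by decide)]
            rfl
          · simp only [if_neg h4]
            rw [show pvRest4 = pvG ["key", "keys"] 5 ++ pvRest5 from rfl, List.foldl_append, pvfold_group m ["key", "keys"] 5 14 (by norm_num)]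
            by_cases h5 : (["key", "keys"].any (fun w => PySem.Str.isIn w m)) = true
            · simp only [if_pos h5]
              rw [pvfold_ge m pvRest5 5 (by decide)]
              rfl
            · simp only [if_neg h5]
              rw [show pvRest5 = pvG ["dicom", "medical", "image"] 6 ++ pvRest6 from rfl, List.foldl_append, pvfold_group m ["dicom", "medical", "image"] 6 14 (by norm_num)]
              by_cases h6 : (["dicom", "medical", "image"].any (fun w => PySem.Str.isIn w m)) = true
              · simp only [if_pos h6]
                rw [pvfold_ge m pvRest6 6 (by decide)]
                rfl
              · simp only [if_neg h6]
                rw [show pvRest6 = pvG ["help", "help me", "support"] 7 ++ pvRest7 from rfl, List.foldl_append, pvfold_group m ["help", "help me", "support"] 7 14 (by norm_num)]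
                by_cases h7 : (["help", "help me", "support"].any (fun w => PySem.Str.isIn w m)) = true
                · simp only [if_pos h7]
                  rw [pvfold_ge m pvRest7 7 (by decide)]
                  rfl
                · simp only [if_neg h7]
                  rw [show pvRest7 = pvG ["thank", "thanks"] 8 ++ pvRest8 from rfl, List.foldl_append, pvfold_group m ["thank", "thanks"] 8 14 (by norm_num)]
                  by_cases h8 : (["thank", "thanks"].any (fun w => PySem.Str.isIn w m)) = true
                  · simp only [if_pos h8]
                    rw [pvfold_ge m pvRest8 8 (by decide)]
                    rfl
                  · simp only [if_neg h8]
                    rw [show pvRest8 = pvG ["prescription", "medication"] 9 ++ pvRest9 from rfl, List.foldl_append, pvfold_group m ["prescription", "medication"] 9 14 (by norm_num)]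
                    by_cases h9 : (["prescription", "medication"].any (fun w => PySem.Str.isIn w m)) = true
                    · simp only [if_pos h9]
                      rw [pvfold_ge m pvRest9 9 (by decide)]
                      rfl
                    · simp only [if_neg h9]
                      rw [show pvRest9 = pvG ["report", "medical report"] 10 ++ pvRest10 from rfl, List.foldl_append, pvfold_group m ["report", "medical report"] 10 14 (by norm_num)]
                      by_cases h10 : (["report", "medical report"].any (fun w => PySem.Str.isIn w m)) = true
                      · simp only [if_pos h10]
                        rw [pvfold_ge m pvRest10 10 (by decide)]
                        rfl
                      · simp only [if_neg h10]
                        rw [show pvRest10 = pvG ["appointment", "schedule"] 11 ++ pvRest11 from rfl, List.foldl_append, pvfold_group m ["appointment", "schedule"] 11 14 (by norm_num)]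
                        by_cases h11 : (["appointment", "schedule"].any (fun w => PySem.Str.isIn w m)) = true
                        · simp only [if_pos h11]
                          rw [pvfold_ge m pvRest11 11 (by decide)]
                          rfl
                        · simp only [if_neg h11]
                          rw [show pvRest11 = pvG ["record", "patient record"] 12 ++ pvRest12 from rfl, List.foldl_append, pvfold_group m ["record", "patient record"] 12 14 (by norm_num)]
                          by_cases h12 : (["record", "patient record"].any (fun w => PySem.Str.isIn w m)) = true
                          · simp only [if_pos h12]
                            rw [pvfold_ge m pvRest12 12 (by decide)]
                            rfl
                          · simp only [if_neg h12]
                            rw [show pvRest12 = pvG ["hi", "hello", "hey"] 13 from rfl, pvfold_group m ["hi", "hello", "hey"] 13 14 (by norm_num)]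
                            by_cases h13 : (["hi", "hello", "hey"].any (fun w => PySem.Str.isIn w m)) = true
                            · simp only [if_pos h13]; rfl
                            · simp only [if_neg h13]
                              rfl
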